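-- pv_equiv track=rewrite | github.com/Nat4uki/cov-sys-django | predictor/closeaj/SEIR.py | Statistical_node_state
-- ===== SOURCE A (Python) =====
-- def Statistical_node_state(node_stata_list):
--     # 重新统计各个节点状态
--     Susceptibility_node_list = []  # 存放易感节点
--     latent_node_list = []  # 存放潜伏节点
--     Infect_node_list = []  # 存放感染节点
--     recover_node_list = []  # 存放恢复节点
--     controls_node_list = []  # 存放管控节点个数
--
--     for i in range(len(node_stata_list)):
--
--         if node_stata_list[i] == 1:
--             Susceptibility_node_list.append(i)
--         elif node_stata_list[i] == 2:
--             latent_node_list.append(i)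
--         elif node_stata_list[i] == 3:
--             Infect_node_list.append(i)
--         elif node_stata_list[i] == 4:
--             recover_node_list.append(i)
--         # elif node_stata_list[i] == 5:
--         #     controls_node_list.append(i)
--
--         elif node_stata_list[i] == 0:
--             Infect_node_list.append(i)
--     return Susceptibility_node_list, latent_node_list, Infect_node_list, recover_node_list
-- ===== SOURCE B (Python) =====
-- def Statistical_node_state(node_stata_list):
--     # One enumerate-based comprehension per bucket; infected collects states 3 and 0.
--     Susceptibility = [i for i, v in enumerate(node_stata_list) if v == 1]
--     latent = [i for i, v in enumerate(node_stata_list) if v == 2]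
--     Infect = [i for i, v in enumerate(node_stata_list) if v == 3 or v == 0]
--     recover = [i for i, v in enumerate(node_stata_list) if v == 4]
--     return Susceptibility, latent, Infect, recover
-- ===== Notes on version B (the rewrite author's own statement) =====
-- stated objective: idiomatic
-- what changed: Replaced the single index loop with mutable append order into four buckets by four independent enumerate-filter comprehensions (Infect filtering v==3 or v==0); the unused controls list is dropped.
import Mathlib
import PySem

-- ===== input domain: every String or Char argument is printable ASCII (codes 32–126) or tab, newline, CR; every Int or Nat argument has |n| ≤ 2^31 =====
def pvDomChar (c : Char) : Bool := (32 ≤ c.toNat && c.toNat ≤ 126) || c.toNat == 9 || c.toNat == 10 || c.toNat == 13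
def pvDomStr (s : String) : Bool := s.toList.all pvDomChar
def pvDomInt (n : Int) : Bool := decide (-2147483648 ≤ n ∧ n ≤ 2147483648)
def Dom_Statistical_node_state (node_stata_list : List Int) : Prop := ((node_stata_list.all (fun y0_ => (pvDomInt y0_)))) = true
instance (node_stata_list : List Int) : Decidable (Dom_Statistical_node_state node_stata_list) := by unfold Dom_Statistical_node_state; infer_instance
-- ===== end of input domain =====

-- B replaces A's single index loop appending into four mutable buckets by four
-- independent enumerate-filter passes (idiomatic; Infect collects states 3 and 0).


-- ===== PORT A =====
-- loop body of A: branch order exactly as the Python if/elif chain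
def pvStepA (st : List Int × List Int × List Int × List Int) (i v : Int) :
    List Int × List Int × List Int × List Int :=
  if v = 1 then (st.1 ++ [i], st.2.1, st.2.2.1, st.2.2.2)
  else if v = 2 then (st.1, st.2.1 ++ [i], st.2.2.1, st.2.2.2)
  else if v = 3 then (st.1, st.2.1, st.2.2.1 ++ [i], st.2.2.2)
  else if v = 4 then (st.1, st.2.1, st.2.2.1, st.2.2.2 ++ [i])
  else if v = 0 then (st.1, st.2.1, st.2.2.1 ++ [i], st.2.2.2)
  else st

def Statistical_node_state (node_stata_list : List Int) : List Int × List Int × List Int × List Int :=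
  (PySem.List.pyRange 0 (node_stata_list.length : Int) 1).foldl
    (fun st i => pvStepA st i (PySem.List.pyGetD node_stata_list i 0))
    ([], [], [], [])

-- ===== PORT B =====
def Statistical_node_state_alt (node_stata_list : List Int) : List Int × List Int × List Int × List Int :=
  let e := PySem.List.enumerate node_stata_list 0
  ((e.filter (fun p => p.2 == 1)).map (·.1),
   (e.filter (fun p => p.2 == 2)).map (·.1),
   (e.filter (fun p => p.2 == 3 || p.2 == 0)).map (·.1),
   (e.filter (fun p => p.2 == 4)).map (·.1))

-- ===== PRECONDITION & SPEC =====
def Spec_Statistical_node_state (node_stata_list : List Int) (out : List Int × List Int × List Int × List Int) : Prop := out = Statistical_node_state_alt node_stata_list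
instance (node_stata_list : List Int) (out : List Int × List Int × List Int × List Int) : Decidable (Spec_Statistical_node_state node_stata_list out) := by unfold Spec_Statistical_node_state; infer_instance

-- ===== CLAIM (what is proved, stated in full; the proofs are below) =====
def Claim_equal_Statistical_node_state : Prop := ∀ (node_stata_list : List Int), Dom_Statistical_node_state node_stata_list → Spec_Statistical_node_state node_stata_list (Statistical_node_state node_stata_list)

-- ===== LEMMAS AND PROOFS =====

-- A's index loop over the suffix xs of pre ++ xs equals a fold over enumerate xs pre.length
lemma foldA_eq_enum (xs pre : List Int) (init : List Int × List Int × List Int × List Int) :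
    (PySem.List.pyRange (pre.length : Int) ((pre.length + xs.length : Nat) : Int) 1).foldl
      (fun st i => pvStepA st i (PySem.List.pyGetD (pre ++ xs) i 0)) init
    = (PySem.List.enumerate xs (pre.length : Int)).foldl (fun st p => pvStepA st p.1 p.2) init := by
  induction xs generalizing pre init with
  | nil => simp [PySem.List.pyRange_one_eq_nil, PySem.List.enumerate]
  | cons x xs ih =>
    rw [PySem.List.pyRange_one_cons (by push_cast [List.length_cons]; omega), List.foldl_cons,
        PySem.List.enumerate_cons, List.foldl_cons]
    have hx : PySem.List.pyGetD (pre ++ x :: xs) (pre.length : Int) 0 = x := by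
      rw [PySem.List.pyGetD_natCast]; simp
    rw [hx]
    simp only [show pre ++ x :: xs = (pre ++ [x]) ++ xs from by simp]
    rw [show ((pre.length : Int) + 1) = (((pre ++ [x]).length : Nat) : Int) from by simp,
        show ((pre.length + (x :: xs).length : Nat) : Int)
            = (((pre ++ [x]).length + xs.length : Nat) : Int) from by
          simp; ring]
    exact ih (pre ++ [x]) _

-- the bucket fold equals appending the four filters
lemma fold_enum_eq_filters (l : List (Int × Int)) (a b c d : List Int) :
    l.foldl (fun st p => pvStepA st p.1 p.2) (a, b, c, d)
    = (a ++ (l.filter (fun p => p.2 == 1)).map (·.1),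
       b ++ (l.filter (fun p => p.2 == 2)).map (·.1),
       c ++ (l.filter (fun p => p.2 == 3 || p.2 == 0)).map (·.1),
       d ++ (l.filter (fun p => p.2 == 4)).map (·.1)) := by
  induction l generalizing a b c d with
  | nil => simp
  | cons q l ih =>
    obtain ⟨i, v⟩ := q
    simp only [List.foldl_cons, List.filter_cons]
    rw [ih]
    unfold pvStepA
    by_cases h1 : v = 1 <;> by_cases h2 : v = 2 <;> by_cases h3 : v = 3 <;>
      by_cases h4 : v = 4 <;> by_cases h0 : v = 0 <;>
      simp_all [List.append_assoc]

-- ===== VERDICT (by name: the statement is the Claim_ definition above) =====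
theorem Statistical_node_state_spec : Claim_equal_Statistical_node_state := by
  intro xs _
  unfold Spec_Statistical_node_state Statistical_node_state Statistical_node_state_alt
  have h := foldA_eq_enum xs [] ([], [], [], [])
  simp only [List.nil_append, List.length_nil, Nat.cast_zero, Nat.zero_add] at h
  rw [h, fold_enum_eq_filters]
  simp
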